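-- pv_equiv track=rewrite | github.com/shanemeister/genai-agent-core | core/validation/coverage_checker.py | _stem_match
-- ===== SOURCE A (Python) =====
-- _MIN_STEM_LEN = 6
--
-- def _stem_match(
--     target_core: str,
--     target_synonyms: list[str],
--     documented_text_blob: str,
--     source_term: str,
-- ) -> bool:
--     """Check if target is documented via word-stem matching.
--
--     For medical terms, shared roots like "append-" connect "appendix",
--     "appendicitis", and "appendectomy". This catches implicit documentation
--     that substring matching misses.
--     """
--     combined = documented_text_blob + " ||| " + source_term
--
--     # Collect all candidate terms (target + synonyms)
--     candidates = [target_core] + [s.lower() for s in target_synonyms]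
--
--     for term in candidates:
--         words = term.split()
--         # Only use significant words (>= 4 chars, skip common modifiers)
--         sig_words = [
--             w for w in words
--             if len(w) >= 4 and w not in {"with", "from", "that", "this", "more"}
--         ]
--         if not sig_words:
--             continue
--
--         matched = 0
--         for word in sig_words:
--             if len(word) < _MIN_STEM_LEN:
--                 # Short words: require exact match (already checked above)
--                 continue
--             stem = word[:_MIN_STEM_LEN]
--             if stem in combined:
--                 matched += 1
--
--         # Require at least one significant stem match
--         if matched > 0:
--             return True
--
--     return False
-- ===== SOURCE B (Python) =====
-- _MIN_STEM_LEN = 6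
--
-- def _stem_match(
--     target_core: str,
--     target_synonyms: list[str],
--     documented_text_blob: str,
--     source_term: str,
-- ) -> bool:
--     # Build the index of 6-char stems once, then make one pass over the text.
--     stems = set()
--     for term in [target_core] + [s.lower() for s in target_synonyms]:
--         for w in term.split():
--             if len(w) >= _MIN_STEM_LEN:
--                 stems.add(w[:_MIN_STEM_LEN])
--     combined = documented_text_blob + " ||| " + source_term
--     return any(combined[i:i + _MIN_STEM_LEN] in stems
--                for i in range(len(combined) - (_MIN_STEM_LEN - 1)))
-- ===== Notes on version B (the rewrite author's own statement) =====
-- stated objective: alternative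
-- what changed: B inverts the data flow: it builds a set of all 6-char word stems in one pass over the candidates, then slides a single 6-char window over the combined text and tests each window against that set, instead of A's per-candidate loops with one substring scan of the text per stem.
import Mathlib
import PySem

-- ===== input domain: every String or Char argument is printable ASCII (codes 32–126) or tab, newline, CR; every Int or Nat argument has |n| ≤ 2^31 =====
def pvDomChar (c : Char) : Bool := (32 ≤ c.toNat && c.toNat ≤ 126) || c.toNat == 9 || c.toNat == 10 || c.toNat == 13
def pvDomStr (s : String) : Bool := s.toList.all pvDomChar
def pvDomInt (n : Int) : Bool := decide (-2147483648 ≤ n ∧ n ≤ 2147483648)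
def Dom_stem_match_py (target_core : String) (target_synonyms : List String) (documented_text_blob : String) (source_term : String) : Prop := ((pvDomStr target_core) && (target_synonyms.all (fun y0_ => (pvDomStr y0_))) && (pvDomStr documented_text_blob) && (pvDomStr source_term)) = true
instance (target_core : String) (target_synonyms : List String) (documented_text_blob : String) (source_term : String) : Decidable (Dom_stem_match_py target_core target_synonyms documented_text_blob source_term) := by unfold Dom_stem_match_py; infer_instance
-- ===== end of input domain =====

-- B builds the set of 6-char word stems once and slides one 6-char window over the text,
-- replacing A's per-stem substring scans (alternative decomposition; same observable result).


-- ===== PORT A =====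
-- the literal set {"with", "from", "that", "this", "more"}
def pvStopwords : List (List Char) :=
  ["with".toList, "from".toList, "that".toList, "this".toList, "more".toList]

-- the `for term in candidates` loop of A, with its two `continue`s and the early return
def pvMatchLoop : List (List Char) → List Char → Bool
  | [], _ => false
  | term :: rest, combined =>
    let words := PySem.Chars.split₀ term
    let sig_words := words.filter (fun w => decide (4 ≤ w.length) && !(pvStopwords.contains w))
    if sig_words.isEmpty then pvMatchLoop rest combined
    else
      let matched : Int := sig_words.foldl (fun m word =>
        if word.length < 6 then m
        else if PySem.Chars.isIn (PySem.List.slice word none (some 6)) combined then m + 1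
        else m) 0
      if matched > 0 then true else pvMatchLoop rest combined

def stem_match_py (target_core : String) (target_synonyms : List String) (documented_text_blob : String) (source_term : String) : Bool :=
  let combined := documented_text_blob.toList ++ " ||| ".toList ++ source_term.toList
  let candidates := target_core.toList :: target_synonyms.map (fun s => PySem.Chars.lower s.toList)
  pvMatchLoop candidates combined

-- ===== PORT B =====
-- first pass of B: collect every w[:6] for words w with len(w) >= 6 into a set
def pvStemSet (candidates : List (List Char)) : PySem.Set (List Char) :=
  candidates.foldl (fun s term =>
    (PySem.Chars.split₀ term).foldl (fun s w =>
      if 6 ≤ w.length then PySem.Set.add s (PySem.List.slice w none (some 6)) else s) s)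
    PySem.Set.empty

def stem_match_py_alt (target_core : String) (target_synonyms : List String) (documented_text_blob : String) (source_term : String) : Bool :=
  let stems := pvStemSet (target_core.toList :: target_synonyms.map (fun s => PySem.Chars.lower s.toList))
  let combined := documented_text_blob.toList ++ " ||| ".toList ++ source_term.toList
  (PySem.List.pyRange 0 ((combined.length : Int) - 5)).any
    (fun i => PySem.Set.contains stems (PySem.List.slice combined (some i) (some (i + 6))))

-- ===== PRECONDITION & SPEC =====
def Spec_stem_match_py (target_core : String) (target_synonyms : List String) (documented_text_blob : String) (source_term : String) (out : Bool) : Prop := out = stem_match_py_alt target_core target_synonyms documented_text_blob source_term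
instance (target_core : String) (target_synonyms : List String) (documented_text_blob : String) (source_term : String) (out : Bool) : Decidable (Spec_stem_match_py target_core target_synonyms documented_text_blob source_term out) := by unfold Spec_stem_match_py; infer_instance

-- ===== CLAIM (what is proved, stated in full; the proofs are below) =====
def Claim_equal_stem_match_py : Prop := ∀ (target_core : String) (target_synonyms : List String) (documented_text_blob : String) (source_term : String), Dom_stem_match_py target_core target_synonyms documented_text_blob source_term → Spec_stem_match_py target_core target_synonyms documented_text_blob source_term (stem_match_py target_core target_synonyms documented_text_blob source_term)

-- ===== LEMMAS AND PROOFS =====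

-- per-term hit: some word of the term has length ≥ 6 and its 6-char stem occurs in the text
def pvTermHit (t : List Char) (combined : List Char) : Prop :=
  ∃ w ∈ PySem.Chars.split₀ t, 6 ≤ w.length ∧
    PySem.Chars.isIn (PySem.List.slice w none (some 6)) combined = true

-- the common characterisation of both programs
def pvHit (candidates : List (List Char)) (combined : List Char) : Prop :=
  ∃ t ∈ candidates, pvTermHit t combined

def pvSigPred (w : List Char) : Bool := decide (4 ≤ w.length) && !(pvStopwords.contains w)

def pvCntPred (combined : List Char) (w : List Char) : Bool :=
  decide (¬ w.length < 6) && PySem.Chars.isIn (PySem.List.slice w none (some 6)) combined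

lemma pv_stop_len {w : List Char} (h : w ∈ pvStopwords) : w.length = 4 := by
  simp only [pvStopwords, List.mem_cons, List.not_mem_nil, or_false] at h
  rcases h with h | h | h | h | h <;> subst h <;> decide

lemma pvTermHit_iff (t : List Char) (combined : List Char) :
    pvTermHit t combined ↔
      ∃ w ∈ (PySem.Chars.split₀ t).filter pvSigPred, pvCntPred combined w = true := by
  constructor
  · rintro ⟨w, hw, h6, hin⟩
    refine ⟨w, ?_, ?_⟩
    · have hns : ¬ pvStopwords.contains w = true := by
        intro hc
        have := pv_stop_len (by simpa using hc)
        omega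
      simp only [List.mem_filter, pvSigPred, Bool.and_eq_true, decide_eq_true_eq,
        Bool.not_eq_true']
      exact ⟨hw, by omega, by simpa using hns⟩
    · simp only [pvCntPred, Bool.and_eq_true, decide_eq_true_eq]
      exact ⟨by omega, hin⟩
  · rintro ⟨w, hw, hp⟩
    simp only [List.mem_filter] at hw
    simp only [pvCntPred, Bool.and_eq_true, decide_eq_true_eq] at hp
    exact ⟨w, hw.1, by omega, hp.2⟩

lemma pvMatched_eq (sig : List (List Char)) (combined : List Char) :
    sig.foldl (fun m word =>
        if word.length < 6 then m
        else if PySem.Chars.isIn (PySem.List.slice word none (some 6)) combined then m + 1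
        else m) (0 : Int)
      = (0 : Int) + (sig.countP (pvCntPred combined) : Int) := by
  have hfun : (fun (m : Int) word =>
      if word.length < 6 then m
      else if PySem.Chars.isIn (PySem.List.slice word none (some 6)) combined then m + 1
      else m) = (fun (m : Int) word => if pvCntPred combined word then m + 1 else m) := by
    funext m w
    simp only [pvCntPred, Bool.and_eq_true, decide_eq_true_eq]
    split_ifs with h1 h2 h3 h4 <;> first | rfl | omega | tauto
  rw [hfun, PySem.List.foldl_count_if]

lemma pvMatchLoop_iff (cs : List (List Char)) (combined : List Char) :
    pvMatchLoop cs combined = true ↔ pvHit cs combined := by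
  induction cs with
  | nil => simp [pvMatchLoop, pvHit]
  | cons t rest ih =>
    have hcons : pvHit (t :: rest) combined ↔ pvTermHit t combined ∨ pvHit rest combined := by
      simp [pvHit]
    rw [hcons]
    show (if ((PySem.Chars.split₀ t).filter pvSigPred).isEmpty then pvMatchLoop rest combined
      else if (((PySem.Chars.split₀ t).filter pvSigPred).foldl (fun m word =>
        if word.length < 6 then m
        else if PySem.Chars.isIn (PySem.List.slice word none (some 6)) combined then m + 1
        else m) (0 : Int)) > 0 then true else pvMatchLoop rest combined) = true ↔ _
    have hcnt : (((PySem.Chars.split₀ t).filter pvSigPred).foldl (fun m word =>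
        if word.length < 6 then m
        else if PySem.Chars.isIn (PySem.List.slice word none (some 6)) combined then m + 1
        else m) (0 : Int) > 0) ↔ pvTermHit t combined := by
      rw [pvMatched_eq, pvTermHit_iff]
      rw [zero_add]
      constructor
      · intro h
        have : 0 < ((PySem.Chars.split₀ t).filter pvSigPred).countP (pvCntPred combined) := by
          exact_mod_cast h
        obtain ⟨w, hw, hp⟩ := List.countP_pos_iff.mp this
        exact ⟨w, hw, hp⟩
      · rintro ⟨w, hw, hp⟩
        have : 0 < ((PySem.Chars.split₀ t).filter pvSigPred).countP (pvCntPred combined) :=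
          List.countP_pos_iff.mpr ⟨w, hw, hp⟩
        exact_mod_cast this
    by_cases hempty : ((PySem.Chars.split₀ t).filter pvSigPred).isEmpty
    · have hnohit : ¬ pvTermHit t combined := by
        rw [pvTermHit_iff]
        rintro ⟨w, hw, -⟩
        rw [List.isEmpty_iff] at hempty
        simp [hempty] at hw
      simp [hempty, ih, hnohit]
    · simp only [hempty, Bool.false_eq_true, if_false]
      by_cases hm : pvTermHit t combined
      · rw [if_pos (hcnt.mpr hm)]; simp [hm]
      · rw [if_neg (fun h => hm (hcnt.mp h))]
        simp [ih, hm]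

-- B side: membership in the stem set
lemma pvStemSet_inner_mem (ws : List (List Char)) (s : PySem.Set (List Char)) (x : List Char) :
    x ∈ ws.foldl (fun s w =>
        if 6 ≤ w.length then PySem.Set.add s (PySem.List.slice w none (some 6)) else s) s ↔
      x ∈ s ∨ ∃ w ∈ ws, 6 ≤ w.length ∧ x = PySem.List.slice w none (some 6) := by
  induction ws generalizing s with
  | nil => simp
  | cons w ws ih =>
    simp only [List.foldl_cons, ih, List.exists_mem_cons_iff]
    by_cases h6 : 6 ≤ w.length
    · simp [h6, PySem.Set.mem_add, or_assoc]
    · simp [h6]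

lemma pvStemSet_mem (cs : List (List Char)) (x : List Char) :
    x ∈ pvStemSet cs ↔
      ∃ t ∈ cs, ∃ w ∈ PySem.Chars.split₀ t, 6 ≤ w.length ∧
        x = PySem.List.slice w none (some 6) := by
  unfold pvStemSet
  suffices h : ∀ (s : PySem.Set (List Char)),
      x ∈ cs.foldl (fun s term => (PySem.Chars.split₀ term).foldl (fun s w =>
          if 6 ≤ w.length then PySem.Set.add s (PySem.List.slice w none (some 6)) else s) s) s ↔
        x ∈ s ∨ ∃ t ∈ cs, ∃ w ∈ PySem.Chars.split₀ t, 6 ≤ w.length ∧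
          x = PySem.List.slice w none (some 6) by
    simpa [PySem.Set.empty] using h PySem.Set.empty
  induction cs with
  | nil => simp
  | cons t cs ih =>
    intro s
    simp only [List.foldl_cons, ih, pvStemSet_inner_mem, List.exists_mem_cons_iff, or_assoc]

-- 6-char windows: a 6-char stem is a substring iff some window equals it
lemma pv_window_iff (stem combined : List Char) (hlen : stem.length = 6) :
    PySem.Chars.isIn stem combined = true ↔
      ∃ i : Int, 0 ≤ i ∧ i < (combined.length : Int) - 5 ∧
        PySem.List.slice combined (some i) (some (i + 6)) = stem := by
  constructor
  · intro h
    obtain ⟨j, hj⟩ := (PySem.Chars.exists_prefix_drop_iff_isIn stem combined).mpr h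
    have hs : stem = (combined.drop j).take 6 := by
      have := List.prefix_iff_eq_take.mp hj
      rwa [hlen] at this
    have hjlen : j + 6 ≤ combined.length := by
      have h1 : ((combined.drop j).take 6).length = 6 := by rw [← hs, hlen]
      simp only [List.length_take, List.length_drop] at h1
      omega
    refine ⟨(j : Int), by positivity, by omega, ?_⟩
    have : ((j : Int) + 6) = ((j : Int) + ((6 : Nat) : Int)) := by norm_num
    rw [this, PySem.List.slice_natCast_add, ← hs]
  · rintro ⟨i, h0, hlt, hsl⟩
    obtain ⟨j, rfl⟩ := Int.eq_ofNat_of_zero_le h0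
    have : ((j : Int) + 6) = ((j : Int) + ((6 : Nat) : Int)) := by norm_num
    rw [this, PySem.List.slice_natCast_add] at hsl
    refine (PySem.Chars.exists_prefix_drop_iff_isIn stem combined).mp ⟨j, ?_⟩
    rw [← hsl]
    exact List.take_prefix _ _

-- every stored stem has length exactly 6
lemma pv_slice_len {w : List Char} (h6 : 6 ≤ w.length) :
    (PySem.List.slice w none (some 6)).length = 6 := by
  have : PySem.List.slice w none (some ((6 : Nat) : Int)) = w.take 6 :=
    PySem.List.slice_to_natCast w 6
  have h66 : ((6 : Nat) : Int) = (6 : Int) := by norm_num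
  rw [h66] at this
  rw [this, List.length_take]
  omega

lemma pvAlt_iff (cs : List (List Char)) (combined : List Char) :
    ((PySem.List.pyRange 0 ((combined.length : Int) - 5)).any
      (fun i => PySem.Set.contains (pvStemSet cs) (PySem.List.slice combined (some i) (some (i + 6)))))
      = true ↔ pvHit cs combined := by
  rw [List.any_eq_true]
  constructor
  · rintro ⟨i, hi, hc⟩
    rw [PySem.List.mem_pyRange_one] at hi
    have hmem : PySem.List.slice combined (some i) (some (i + 6)) ∈ pvStemSet cs := by
      simpa [PySem.Set.contains] using hc
    obtain ⟨t, ht, w, hw, h6, hx⟩ := (pvStemSet_mem cs _).mp hmem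
    refine ⟨t, ht, w, hw, h6, ?_⟩
    rw [pv_window_iff _ _ (pv_slice_len h6)]
    exact ⟨i, hi.1, hi.2, hx⟩
  · rintro ⟨t, ht, w, hw, h6, hin⟩
    rw [pv_window_iff _ _ (pv_slice_len h6)] at hin
    obtain ⟨i, h0, hlt, hsl⟩ := hin
    refine ⟨i, PySem.List.mem_pyRange_one.mpr ⟨h0, hlt⟩, ?_⟩
    have hmem : PySem.List.slice combined (some i) (some (i + 6)) ∈ pvStemSet cs := by
      rw [hsl]
      exact (pvStemSet_mem cs _).mpr ⟨t, ht, w, hw, h6, rfl⟩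
    simpa [PySem.Set.contains] using hmem

-- ===== VERDICT (by name: the statement is the Claim_ definition above) =====
theorem stem_match_py_spec : Claim_equal_stem_match_py := by
  intro tc ts blob st _
  unfold Spec_stem_match_py stem_match_py stem_match_py_alt
  rw [Bool.eq_iff_iff]
  rw [pvMatchLoop_iff, pvAlt_iff]
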